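-- pv_equiv track=rewrite | github.com/YizeWang/Robust-Toll-Pricing-Algorithm | ScenarioApproach/myPython/GetRowColDict.py | GetRowColDict
-- ===== SOURCE A (Python) =====
-- def GetRowColDict(rows, cols):
--
--     currRow = None
--     currCol = []
--     retCols = {}
--
--     for i in range(len(rows)):
--
--         if rows[i] == currRow or currRow == None:
--             currCol.append(cols[i])
--         else:
--             retCols[currRow] = currCol
--             currCol = []
--             currCol.append(cols[i])
--
--         currRow = rows[i]
--
--     retCols[currRow] = currCol
--
--     return set(rows), retCols
-- ===== SOURCE B (Python) =====
-- def GetRowColDict(rows, cols):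
--
--     stack = list(zip(rows, cols))[::-1]
--     retCols = {}
--
--     while stack:
--         r, c = stack.pop()
--         run = [c]
--         while stack and stack[-1][0] == r:
--             run.append(stack.pop()[1])
--         retCols[r] = run
--
--     return set(rows), retCols
-- ===== Notes on version B (the rewrite author's own statement) =====
-- stated objective: alternative
-- what changed: B replaces A's element-at-a-time state machine (carried currRow/currCol with a None sentinel and a fall-through final insert) by run-at-a-time consumption: it zips rows with cols onto a stack and pops one whole run of equal rows per outer iteration, assigning the dict entry once per run.
-- outside the precondition, e.g. on GetRowColDict([], []): A returns (set(), {None: []}), B returns (set(), {})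
import Mathlib
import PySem

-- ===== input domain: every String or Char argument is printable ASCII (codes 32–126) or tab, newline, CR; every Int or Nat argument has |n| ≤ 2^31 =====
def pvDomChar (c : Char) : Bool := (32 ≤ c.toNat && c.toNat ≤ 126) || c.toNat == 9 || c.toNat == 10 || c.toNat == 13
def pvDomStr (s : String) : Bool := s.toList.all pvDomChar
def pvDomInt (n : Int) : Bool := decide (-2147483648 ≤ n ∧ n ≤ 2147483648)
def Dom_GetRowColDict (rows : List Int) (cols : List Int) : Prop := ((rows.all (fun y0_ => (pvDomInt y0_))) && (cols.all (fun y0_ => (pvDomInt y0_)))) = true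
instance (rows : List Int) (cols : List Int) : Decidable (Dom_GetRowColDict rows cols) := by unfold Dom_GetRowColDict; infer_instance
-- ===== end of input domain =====

-- B groups consecutive equal rows run-at-a-time from a stack of (row, col) pairs, instead of A's
-- element-at-a-time state machine with a carried currRow/currCol and a fall-through final insert.

-- ===== PORT A =====
def GetRowColDict (rows : List Int) (cols : List Int) : List Int × (List (Int × List Int)) :=
  -- currRow = None; currCol = []; retCols = {}; for i in range(len(rows)): …
  let step := fun (s : Option Int × List Int × PySem.Dict Int (List Int)) (i : Int) =>
    match s with
    | (currRow, currCol, retCols) =>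
      let ri := PySem.List.pyGetD rows i 0   -- rows[i]; in range for i ∈ range(len(rows))
      let ci := PySem.List.pyGetD cols i 0   -- cols[i]; in range under Pre_ (len(rows) ≤ len(cols))
      if currRow = some ri ∨ currRow = none then
        (some ri, currCol ++ [ci], retCols)
      else
        (some ri, [ci], retCols.insert (currRow.getD 0) currCol)  -- currRow ≠ None in this branch
  match (PySem.List.pyRange 0 (rows.length : Int) 1).foldl step (none, [], PySem.Dict.empty) with
  | (currRow, currCol, retCols) =>
    -- retCols[currRow] = currCol; under Pre_ rows ≠ [], so currRow is an int here (getD 0 is never hit)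
    (PySem.Set.ofList rows, (retCols.insert (currRow.getD 0) currCol).items)

-- ===== PORT B =====
-- B's stack holds the zipped pairs reversed and pops from the END; we represent the stack with its
-- top at the HEAD (i.e. the un-reversed pair list), so stack.pop() is head consumption.
-- inner 'while stack and stack[-1][0] == r: run.append(stack.pop()[1])'
def pvPopRun (r : Int) : List (Int × Int) → List Int → List Int × List (Int × Int)
  | [], run => (run, [])
  | (q, c) :: rest, run =>
      if q == r then pvPopRun r rest (run ++ [c]) else (run, (q, c) :: rest)

-- characterisation of the inner while-loop (also needed for the outer loop's termination)
theorem pvPopRun_eq (r : Int) (l : List (Int × Int)) : ∀ (run : List Int),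
    pvPopRun r l run = (run ++ (l.takeWhile (fun q => q.1 == r)).map (·.2),
                        l.dropWhile (fun q => q.1 == r)) := by
  induction l with
  | nil => intro run; simp [pvPopRun]
  | cons p rest ih =>
      intro run
      obtain ⟨q, c⟩ := p
      by_cases h : q = r
      · simp [pvPopRun, h, ih]
      · simp [pvPopRun, h]

-- outer 'while stack: r, c = stack.pop(); run = [c]; …; retCols[r] = run'
def pvAltLoop : List (Int × Int) → PySem.Dict Int (List Int) → PySem.Dict Int (List Int)
  | [], d => d
  | (r, c) :: rest, d =>
      let pr := pvPopRun r rest [c]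
      pvAltLoop pr.2 (d.insert r pr.1)
termination_by l => l.length
decreasing_by
  simp only [pvPopRun_eq]
  exact Nat.lt_succ_of_le (List.length_dropWhile_le _ _)

def GetRowColDict_alt (rows : List Int) (cols : List Int) : List Int × (List (Int × List Int)) :=
  (PySem.Set.ofList rows, (pvAltLoop (rows.zip cols) PySem.Dict.empty).items)

-- ===== PRECONDITION & SPEC =====
-- Pre_ excludes empty rows, where A's fall-through assignment returns {None: []} — a dict keyed by
-- None, not a value of the declared dict[int, list[int]] type — and inputs with len(rows) > len(cols),
-- where A raises IndexError.
def Pre_GetRowColDict (rows : List Int) (cols : List Int) : Prop :=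
  rows ≠ [] ∧ rows.length ≤ cols.length
instance (rows : List Int) (cols : List Int) : Decidable (Pre_GetRowColDict rows cols) := by
  unfold Pre_GetRowColDict; infer_instance

def pvWitness_GetRowColDict : List Int × List Int := ([1, 1, 2, 1], [10, 20, 30, 40])

def Spec_GetRowColDict (rows : List Int) (cols : List Int) (out : List Int × (List (Int × List Int))) : Prop := out = GetRowColDict_alt rows cols
instance (rows : List Int) (cols : List Int) (out : List Int × (List (Int × List Int))) : Decidable (Spec_GetRowColDict rows cols out) := by unfold Spec_GetRowColDict; infer_instance

-- ===== CLAIM (what is proved, stated in full; the proofs are below) =====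
def Claim_equal_GetRowColDict : Prop := ∀ (rows : List Int) (cols : List Int), Dom_GetRowColDict rows cols → Pre_GetRowColDict rows cols → Spec_GetRowColDict rows cols (GetRowColDict rows cols)

-- ===== LEMMAS AND PROOFS =====

-- A's step on a (row, col) pair (the loop body after substituting rows[i], cols[i])
def pvAStep (s : Option Int × List Int × PySem.Dict Int (List Int)) (p : Int × Int) :
    Option Int × List Int × PySem.Dict Int (List Int) :=
  match s with
  | (currRow, currCol, retCols) =>
      if currRow = some p.1 ∨ currRow = none then
        (some p.1, currCol ++ [p.2], retCols)
      else
        (some p.1, [p.2], retCols.insert (currRow.getD 0) currCol)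

-- A's 'finish' (the final retCols[currRow] = currCol)
def pvFinish (s : Option Int × List Int × PySem.Dict Int (List Int)) : PySem.Dict Int (List Int) :=
  (s.2.2).insert ((s.1).getD 0) s.2.1

-- A's port, re-expressed through the named helpers (definitional)
theorem pv_A_eq (rows cols : List Int) : GetRowColDict rows cols =
    (PySem.Set.ofList rows,
     (pvFinish ((PySem.List.pyRange 0 (rows.length : Int) 1).foldl
        (fun s i => pvAStep s (PySem.List.pyGetD rows i 0, PySem.List.pyGetD cols i 0))
        (none, [], PySem.Dict.empty))).items) := rfl

-- the index range [0, len xs) mapped through (xs[i], ys[i]) is zip xs ys (when ys is long enough)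
theorem pv_zip_eq_map_range (xs ys : List Int) (h : xs.length ≤ ys.length) :
    (PySem.List.pyRange 0 (xs.length : Int) 1).map
        (fun i => (PySem.List.pyGetD xs i 0, PySem.List.pyGetD ys i 0)) = xs.zip ys := by
  apply List.ext_getElem
  · simp [PySem.List.length_pyRange_one, h]
  · intro k h1 h2
    have hk : k < xs.length := by
      simpa [PySem.List.length_pyRange_one] using h1
    have hky : k < ys.length := lt_of_lt_of_le hk h
    simp [PySem.List.getElem_pyRange_one, PySem.List.pyGetD_natCast, hk, hky]

-- main invariant: A's fold from a mid-run state, plus the final insert, is B's run-at-a-time loop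
theorem pv_fold_eq_altLoop (pairs : List (Int × Int)) : ∀ (r : Int) (cc : List Int)
    (d : PySem.Dict Int (List Int)),
    pvFinish (pairs.foldl pvAStep (some r, cc, d)) =
      pvAltLoop (pairs.dropWhile (fun q => q.1 == r))
        (d.insert r (cc ++ (pairs.takeWhile (fun q => q.1 == r)).map (·.2))) := by
  induction pairs with
  | nil => intro r cc d; simp [pvFinish, pvAltLoop]
  | cons p rest ih =>
      intro r cc d
      obtain ⟨r', c⟩ := p
      by_cases h : r' = r
      · subst h
        rw [List.foldl_cons]
        have hst : pvAStep (some r', cc, d) (r', c) = (some r', cc ++ [c], d) := by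
          simp [pvAStep]
        rw [hst, ih r' (cc ++ [c]) d]
        simp
      · have hst : pvAStep (some r, cc, d) (r', c) = (some r', [c], d.insert r cc) := by
          simp [pvAStep, Ne.symm h]
        rw [List.foldl_cons, hst, ih r' [c] (d.insert r cc)]
        have hbeq : (r' == r) = false := by simp [h]
        simp [hbeq, pvAltLoop, pvPopRun_eq]

-- ===== VERDICT (by name: the statement is the Claim_ definition above) =====
theorem GetRowColDict_spec : Claim_equal_GetRowColDict := by
  intro rows cols _ hpre
  obtain ⟨hne, hlen⟩ := hpre
  unfold Spec_GetRowColDict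
  match rows, hne with
  | h :: t, _ =>
  match cols, hlen with
  | c0 :: cs, hlen =>
    rw [pv_A_eq]
    have hfold : (PySem.List.pyRange 0 (((h :: t).length : Int)) 1).foldl
        (fun s i => pvAStep s (PySem.List.pyGetD (h :: t) i 0, PySem.List.pyGetD (c0 :: cs) i 0))
        (none, [], PySem.Dict.empty) =
        ((h :: t).zip (c0 :: cs)).foldl pvAStep (none, [], PySem.Dict.empty) := by
      rw [← pv_zip_eq_map_range (h :: t) (c0 :: cs) hlen, List.foldl_map]
    rw [hfold]
    have h1 : ((h :: t).zip (c0 :: cs)).foldl pvAStep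
        ((none : Option Int), ([] : List Int), (PySem.Dict.empty : PySem.Dict Int (List Int))) =
        (t.zip cs).foldl pvAStep (some h, [c0], PySem.Dict.empty) := by
      simp [pvAStep]
    rw [h1, pv_fold_eq_altLoop]
    have h3 : pvAltLoop ((h :: t).zip (c0 :: cs)) PySem.Dict.empty =
        pvAltLoop ((t.zip cs).dropWhile (fun q => q.1 == h))
          (PySem.Dict.empty.insert h ([c0] ++ ((t.zip cs).takeWhile (fun q => q.1 == h)).map (·.2))) := by
      simp [pvAltLoop, pvPopRun_eq]
    unfold GetRowColDict_alt
    rw [h3]
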